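-- pv_equiv track=rewrite | github.com/litchi7777/har-atlas | analysis/embedding_explorer/extract_features.py | map_location_to_category
-- ===== SOURCE A (Python) =====
-- def map_location_to_category(location):
--     """
--     身体部位の生の名前をカテゴリに変換
--
--     Args:
--         location: 元の身体部位名（例: "RightUpperArm", "LeftAnkle"）
--
--     Returns:
--         category: カテゴリ名（Arm, Leg, Front, Ankle, Wrist, Phone, Back, Head）
--     """
--     location_lower = location.lower()
--
--     # ATRデバイス（特定のデバイスID）
--     if 'atr01' in location_lower or 'atr02' in location_lower:
--         return 'Wrist'
--     if 'atr03' in location_lower or 'atr04' in location_lower: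
--         return 'Arm'
--
--     # Wrist（優先度高）
--     if 'wrist' in location_lower:
--         return 'Wrist'
--
--     # Ankle（優先度高）
--     if 'ankle' in location_lower:
--         return 'Ankle'
--
--     # Head
--     if any(kw in location_lower for kw in ['head', 'forehead', 'ear']):
--         return 'Head'
--
--     # Phone
--     if 'phone' in location_lower or 'pocket' in location_lower:
--         return 'Phone'
--
--     # Back
--     if any(kw in location_lower for kw in ['back', 'lumbar', 'spine']):
--         return 'Back'
--
--     # Front (chest, torso, waist)
--     if any(kw in location_lower for kw in ['chest', 'torso', 'waist', 'belt', 'hip']):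
--         return 'Front'
--
--     # Arm (upper arm, forearm, shoulder, hand)
--     if any(kw in location_lower for kw in ['arm', 'hand', 'shoulder', 'elbow', 'finger']):
--         return 'Arm'
--
--     # Leg (thigh, knee, shin, foot)
--     if any(kw in location_lower for kw in ['leg', 'thigh', 'knee', 'shin', 'foot', 'calf']):
--         return 'Leg'
--
--     # デフォルト: そのまま返す
--     return location
-- ===== SOURCE B (Python) =====
-- # B: instead of searching each keyword inside the string (a priority cascade of
-- # substring tests), scan the string ONCE over all of its substrings of length 3..8,
-- # look each up in a keyword->priority hash table, and return the category of the
-- # minimum priority found (dictionary-matching + argmin).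
-- KW_PRIO = {
--     'atr01': 0, 'atr02': 0,
--     'atr03': 1, 'atr04': 1,
--     'wrist': 2,
--     'ankle': 3,
--     'head': 4, 'forehead': 4, 'ear': 4,
--     'phone': 5, 'pocket': 5,
--     'back': 6, 'lumbar': 6, 'spine': 6,
--     'chest': 7, 'torso': 7, 'waist': 7, 'belt': 7, 'hip': 7,
--     'arm': 8, 'hand': 8, 'shoulder': 8, 'elbow': 8, 'finger': 8,
--     'leg': 9, 'thigh': 9, 'knee': 9, 'shin': 9, 'foot': 9, 'calf': 9,
-- }
-- CATS = ['Wrist', 'Arm', 'Wrist', 'Ankle', 'Head', 'Phone', 'Back', 'Front', 'Arm', 'Leg']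
--
--
-- def map_location_to_category(location):
--     s = location.lower()
--     n = len(s)
--     hits = [KW_PRIO[s[i:j]]
--             for i in range(n)
--             for j in range(i + 3, min(i + 8, n) + 1)
--             if s[i:j] in KW_PRIO]
--     return CATS[min(hits)] if hits else location
-- ===== Notes on version B (the rewrite author's own statement) =====
-- stated objective: alternative
-- what changed: Instead of A's priority cascade that searches each keyword inside the string, B scans the lowercased string's substrings of length 3..8 once, looks each up in a keyword-to-priority hash table, and returns the category of the minimum priority found (dictionary matching + argmin; falls back to the input when nothing matches).
import Mathlib
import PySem

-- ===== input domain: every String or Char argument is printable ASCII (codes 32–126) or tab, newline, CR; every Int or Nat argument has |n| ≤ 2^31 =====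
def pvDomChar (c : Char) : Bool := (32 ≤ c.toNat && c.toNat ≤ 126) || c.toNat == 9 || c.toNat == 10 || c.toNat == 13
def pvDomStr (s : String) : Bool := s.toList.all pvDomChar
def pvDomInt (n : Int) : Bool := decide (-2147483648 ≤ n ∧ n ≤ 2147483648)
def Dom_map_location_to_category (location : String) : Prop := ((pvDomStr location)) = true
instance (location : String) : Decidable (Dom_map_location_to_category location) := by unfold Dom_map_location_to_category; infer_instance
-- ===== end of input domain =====

-- B replaces A's priority cascade of per-keyword substring searches by a single scan over the
-- string's substrings of length 3..8, each looked up in a keyword->priority table, returning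
-- the category of the minimum priority found (alternative algorithm: dictionary matching + argmin).
-- ===== PORT A =====
-- Each `'kw' in location_lower` is PySem.Str.isIn (exact substring test); .lower() is PySem.Str.lower.
def map_location_to_category (location : String) : String :=
  let location_lower := PySem.Str.lower location
  if PySem.Str.isIn "atr01" location_lower || PySem.Str.isIn "atr02" location_lower then "Wrist"
  else if PySem.Str.isIn "atr03" location_lower || PySem.Str.isIn "atr04" location_lower then "Arm"
  else if PySem.Str.isIn "wrist" location_lower then "Wrist"
  else if PySem.Str.isIn "ankle" location_lower then "Ankle"
  else if ["head", "forehead", "ear"].any (fun kw => PySem.Str.isIn kw location_lower) then "Head"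
  else if PySem.Str.isIn "phone" location_lower || PySem.Str.isIn "pocket" location_lower then "Phone"
  else if ["back", "lumbar", "spine"].any (fun kw => PySem.Str.isIn kw location_lower) then "Back"
  else if ["chest", "torso", "waist", "belt", "hip"].any (fun kw => PySem.Str.isIn kw location_lower) then "Front"
  else if ["arm", "hand", "shoulder", "elbow", "finger"].any (fun kw => PySem.Str.isIn kw location_lower) then "Arm"
  else if ["leg", "thigh", "knee", "shin", "foot", "calf"].any (fun kw => PySem.Str.isIn kw location_lower) then "Leg"
  else location

-- ===== PORT B =====
-- Source B's KW_PRIO dict, as its (key, value) pairs and the dict built from them.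
def pvKwPairs : List (String × Int) :=
  [("atr01", 0), ("atr02", 0),
   ("atr03", 1), ("atr04", 1),
   ("wrist", 2),
   ("ankle", 3),
   ("head", 4), ("forehead", 4), ("ear", 4),
   ("phone", 5), ("pocket", 5),
   ("back", 6), ("lumbar", 6), ("spine", 6),
   ("chest", 7), ("torso", 7), ("waist", 7), ("belt", 7), ("hip", 7),
   ("arm", 8), ("hand", 8), ("shoulder", 8), ("elbow", 8), ("finger", 8),
   ("leg", 9), ("thigh", 9), ("knee", 9), ("shin", 9), ("foot", 9), ("calf", 9)]

def pvKwPrio : PySem.Dict String Int := PySem.Dict.ofList pvKwPairs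

def pvCats : List String :=
  ["Wrist", "Arm", "Wrist", "Ankle", "Head", "Phone", "Back", "Front", "Arm", "Leg"]

-- Source B's comprehension: [KW_PRIO[s[i:j]] for i in range(n) for j in range(i+3, min(i+8, n)+1)
-- if s[i:j] in KW_PRIO]  (the `if … in` filter plus the lookup is one filterMap over the dict's get?).
def pvHits (s : String) : List Int :=
  (PySem.List.pyRange 0 (PySem.Str.len s) 1).flatMap (fun i =>
    (PySem.List.pyRange (i + 3) (min (i + 8) (PySem.Str.len s) + 1) 1).filterMap (fun j =>
      pvKwPrio.get? (PySem.Str.slice s (some i) (some j))))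

def map_location_to_category_alt (location : String) : String :=
  let s := PySem.Str.lower location
  match PySem.List.min? (pvHits s) (fun x => x) with
  | none => location
  | some m => PySem.List.pyGetD pvCats m ""   -- CATS[min(hits)]; min(hits) is always 0..9

-- ===== PRECONDITION & SPEC =====
def Spec_map_location_to_category (location : String) (out : String) : Prop := out = map_location_to_category_alt location
instance (location : String) (out : String) : Decidable (Spec_map_location_to_category location out) := by unfold Spec_map_location_to_category; infer_instance

-- ===== CLAIM (what is proved, stated in full; the proofs are below) =====
def Claim_equal_map_location_to_category : Prop := ∀ (location : String), Dom_map_location_to_category location → Spec_map_location_to_category location (map_location_to_category location)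

-- ===== LEMMAS AND PROOFS =====

-- "some keyword of priority g occurs in s"
def pvP (s : String) (g : Int) : Prop :=
  ∃ k, (k, g) ∈ pvKwPairs ∧ PySem.Str.isIn k s = true

-- every keyword in the table has length 3..8 and priority 0..9
lemma pvKwPairs_facts : ∀ p ∈ pvKwPairs,
    3 ≤ p.1.toList.length ∧ p.1.toList.length ≤ 8 ∧ 0 ≤ p.2 ∧ p.2 < 10 := by decide

lemma pvP_range (s : String) (q : Int) (h : pvP s q) : 0 ≤ q ∧ q < 10 := by
  obtain ⟨k, hk, -⟩ := h
  exact ⟨(pvKwPairs_facts _ hk).2.2.1, (pvKwPairs_facts _ hk).2.2.2⟩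

lemma pvKwPrio_get? (sub : String) (p : Int) :
    pvKwPrio.get? sub = some p ↔ (sub, p) ∈ pvKwPairs := by
  rw [PySem.Dict.get?_eq_some_iff_mem_items pvKwPrio sub p (by decide),
    show pvKwPrio.items = pvKwPairs from by decide]

-- the substring scan produces K (of length 3..8) iff K is an infix
lemma pvListScan (L K : List Char) (h3 : 3 ≤ K.length) (h8 : K.length ≤ 8) :
    (∃ a b : Nat, a < L.length ∧ a + 3 ≤ b ∧ b ≤ min (a + 8) L.length ∧
        (L.drop a).take (b - a) = K) ↔ K <:+: L := by
  constructor
  · rintro ⟨a, b, _, _, hb, rfl⟩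
    exact (List.take_prefix _ _).isInfix.trans (List.drop_suffix a L).isInfix
  · rintro ⟨u, v, rfl⟩
    refine ⟨u.length, u.length + K.length, ?_, ?_, ?_, ?_⟩
    · simp; omega
    · omega
    · simp; omega
    · rw [List.append_assoc, List.drop_left, Nat.add_sub_cancel_left, List.take_left]

lemma pvSliceEq (s : String) (i j : Int) (hi : 0 ≤ i) (hj : 0 ≤ j) :
    (PySem.Str.slice s (some i) (some j)).toList
      = (s.toList.drop i.toNat).take (j.toNat - i.toNat) := by
  rw [PySem.Str.toList_slice, PySem.Chars.slice_eq_listSlice,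
    PySem.List.slice_toNat _ hi hj]

lemma pvMemHits (s : String) (p : Int) :
    p ∈ pvHits s ↔ pvP s p := by
  simp only [pvHits, List.mem_flatMap, List.mem_filterMap, PySem.List.mem_pyRange_one,
    PySem.Str.len_eq]
  constructor
  · rintro ⟨i, ⟨hi0, hin⟩, j, ⟨hj3, hjm⟩, hget⟩
    rw [pvKwPrio_get?] at hget
    refine ⟨_, hget, ?_⟩
    obtain ⟨h3, h8, -, -⟩ := pvKwPairs_facts _ hget
    rw [PySem.Str.isIn_iff_infix]
    refine (pvListScan s.toList _ h3 h8).mp ⟨i.toNat, j.toNat, ?_, ?_, ?_, ?_⟩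
    · omega
    · omega
    · omega
    · rw [← pvSliceEq s i j hi0 (by omega)]
  · rintro ⟨k, hk, hin⟩
    obtain ⟨h3, h8, -, -⟩ := pvKwPairs_facts _ hk
    rw [PySem.Str.isIn_iff_infix] at hin
    obtain ⟨a, b, ha, hab, hb, heq⟩ := (pvListScan s.toList k.toList h3 h8).mpr hin
    refine ⟨(a : Int), ⟨by omega, by omega⟩, (b : Int), ⟨by omega, by omega⟩, ?_⟩
    rw [pvKwPrio_get?]
    have : PySem.Str.slice s (some (a:Int)) (some (b:Int)) = k := by
      apply String.toList_inj.mp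
      rw [pvSliceEq s _ _ (by omega) (by omega)]
      simpa using heq
    rw [this]; exact hk

lemma pvMinHits (s : String) (g : Int) (hg : pvP s g)
    (hmin : ∀ q, q < g → ¬ pvP s q) :
    PySem.List.min? (pvHits s) (fun x => x) = some g := by
  have hmem : g ∈ pvHits s := (pvMemHits s g).mpr hg
  cases h : PySem.List.min? (pvHits s) (fun x => x) with
  | none =>
      rw [PySem.List.min?_eq_none_iff] at h
      rw [h] at hmem; cases hmem
  | some m =>
      have hm : pvP s m := (pvMemHits s m).mp (PySem.List.min?_mem h)
      have hle : m ≤ g := PySem.List.min?_isMin h g hmem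
      have : ¬ m < g := fun hlt => hmin m hlt hm
      have : m = g := by omega
      rw [this]

lemma pvNoHits (s : String) (h : ∀ q, ¬ pvP s q) :
    PySem.List.min? (pvHits s) (fun x => x) = none := by
  rw [PySem.List.min?_eq_none_iff]
  refine List.eq_nil_iff_forall_not_mem.mpr (fun p hp => h p ((pvMemHits s p).mp hp))

-- each of A's branch conditions is exactly "some keyword of that priority occurs"
lemma pvP0 (s : String) : pvP s 0 ↔ (PySem.Str.isIn "atr01" s || PySem.Str.isIn "atr02" s) = true := by
  simp [pvP, pvKwPairs]
lemma pvP1 (s : String) : pvP s 1 ↔ (PySem.Str.isIn "atr03" s || PySem.Str.isIn "atr04" s) = true := by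
  simp [pvP, pvKwPairs]
lemma pvP2 (s : String) : pvP s 2 ↔ PySem.Str.isIn "wrist" s = true := by
  simp [pvP, pvKwPairs]
lemma pvP3 (s : String) : pvP s 3 ↔ PySem.Str.isIn "ankle" s = true := by
  simp [pvP, pvKwPairs]
lemma pvP4 (s : String) : pvP s 4 ↔ (["head", "forehead", "ear"].any (fun kw => PySem.Str.isIn kw s)) = true := by
  simp [pvP, pvKwPairs]
lemma pvP5 (s : String) : pvP s 5 ↔ (PySem.Str.isIn "phone" s || PySem.Str.isIn "pocket" s) = true := by
  simp [pvP, pvKwPairs]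
lemma pvP6 (s : String) : pvP s 6 ↔ (["back", "lumbar", "spine"].any (fun kw => PySem.Str.isIn kw s)) = true := by
  simp [pvP, pvKwPairs]
lemma pvP7 (s : String) : pvP s 7 ↔ (["chest", "torso", "waist", "belt", "hip"].any (fun kw => PySem.Str.isIn kw s)) = true := by
  simp [pvP, pvKwPairs]
lemma pvP8 (s : String) : pvP s 8 ↔ (["arm", "hand", "shoulder", "elbow", "finger"].any (fun kw => PySem.Str.isIn kw s)) = true := by
  simp [pvP, pvKwPairs]
lemma pvP9 (s : String) : pvP s 9 ↔ (["leg", "thigh", "knee", "shin", "foot", "calf"].any (fun kw => PySem.Str.isIn kw s)) = true := by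
  simp [pvP, pvKwPairs]

-- ===== VERDICT (by name: the statement is the Claim_ definition above) =====
theorem map_location_to_category_spec : Claim_equal_map_location_to_category := by
  intro location _
  show map_location_to_category location = map_location_to_category_alt location
  unfold map_location_to_category map_location_to_category_alt
  set s := PySem.Str.lower location with hs
  by_cases h0 : (PySem.Str.isIn "atr01" s || PySem.Str.isIn "atr02" s) = true
  · have hm := pvMinHits s 0 ((pvP0 s).mpr h0) (fun q hq hP => by
      obtain ⟨hql, hqr⟩ := pvP_range s q hP; omega)
    simp only [h0]
    simp [hm]
    decide
  have n0 : ¬ pvP s 0 := fun h => h0 ((pvP0 s).mp h)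
  by_cases h1 : (PySem.Str.isIn "atr03" s || PySem.Str.isIn "atr04" s) = true
  · have hm := pvMinHits s 1 ((pvP1 s).mpr h1) (fun q hq hP => by
      obtain ⟨hql, hqr⟩ := pvP_range s q hP
      interval_cases q <;> [exact n0 hP])
    simp only [h0, h1]
    simp [hm]
    decide
  have n1 : ¬ pvP s 1 := fun h => h1 ((pvP1 s).mp h)
  by_cases h2 : PySem.Str.isIn "wrist" s = true
  · have hm := pvMinHits s 2 ((pvP2 s).mpr h2) (fun q hq hP => by
      obtain ⟨hql, hqr⟩ := pvP_range s q hP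
      interval_cases q <;> [exact n0 hP; exact n1 hP])
    simp only [h0, h1, h2]
    simp [hm]
    decide
  have n2 : ¬ pvP s 2 := fun h => h2 ((pvP2 s).mp h)
  by_cases h3 : PySem.Str.isIn "ankle" s = true
  · have hm := pvMinHits s 3 ((pvP3 s).mpr h3) (fun q hq hP => by
      obtain ⟨hql, hqr⟩ := pvP_range s q hP
      interval_cases q <;> [exact n0 hP; exact n1 hP; exact n2 hP])
    simp only [h0, h1, h2, h3]
    simp [hm]
    decide
  have n3 : ¬ pvP s 3 := fun h => h3 ((pvP3 s).mp h)
  by_cases h4 : (["head", "forehead", "ear"].any (fun kw => PySem.Str.isIn kw s)) = true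
  · have hm := pvMinHits s 4 ((pvP4 s).mpr h4) (fun q hq hP => by
      obtain ⟨hql, hqr⟩ := pvP_range s q hP
      interval_cases q <;> [exact n0 hP; exact n1 hP; exact n2 hP; exact n3 hP])
    simp only [h0, h1, h2, h3, h4]
    simp [hm]
    decide
  have n4 : ¬ pvP s 4 := fun h => h4 ((pvP4 s).mp h)
  by_cases h5 : (PySem.Str.isIn "phone" s || PySem.Str.isIn "pocket" s) = true
  · have hm := pvMinHits s 5 ((pvP5 s).mpr h5) (fun q hq hP => by
      obtain ⟨hql, hqr⟩ := pvP_range s q hP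
      interval_cases q <;> [exact n0 hP; exact n1 hP; exact n2 hP; exact n3 hP; exact n4 hP])
    simp only [h0, h1, h2, h3, h4, h5]
    simp [hm]
    decide
  have n5 : ¬ pvP s 5 := fun h => h5 ((pvP5 s).mp h)
  by_cases h6 : (["back", "lumbar", "spine"].any (fun kw => PySem.Str.isIn kw s)) = true
  · have hm := pvMinHits s 6 ((pvP6 s).mpr h6) (fun q hq hP => by
      obtain ⟨hql, hqr⟩ := pvP_range s q hP
      interval_cases q <;> [exact n0 hP; exact n1 hP; exact n2 hP; exact n3 hP; exact n4 hP; exact n5 hP])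
    simp only [h0, h1, h2, h3, h4, h5, h6]
    simp [hm]
    decide
  have n6 : ¬ pvP s 6 := fun h => h6 ((pvP6 s).mp h)
  by_cases h7 : (["chest", "torso", "waist", "belt", "hip"].any (fun kw => PySem.Str.isIn kw s)) = true
  · have hm := pvMinHits s 7 ((pvP7 s).mpr h7) (fun q hq hP => by
      obtain ⟨hql, hqr⟩ := pvP_range s q hP
      interval_cases q <;> [exact n0 hP; exact n1 hP; exact n2 hP; exact n3 hP; exact n4 hP; exact n5 hP; exact n6 hP])
    simp only [h0, h1, h2, h3, h4, h5, h6, h7]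
    simp [hm]
    decide
  have n7 : ¬ pvP s 7 := fun h => h7 ((pvP7 s).mp h)
  by_cases h8 : (["arm", "hand", "shoulder", "elbow", "finger"].any (fun kw => PySem.Str.isIn kw s)) = true
  · have hm := pvMinHits s 8 ((pvP8 s).mpr h8) (fun q hq hP => by
      obtain ⟨hql, hqr⟩ := pvP_range s q hP
      interval_cases q <;> [exact n0 hP; exact n1 hP; exact n2 hP; exact n3 hP; exact n4 hP; exact n5 hP; exact n6 hP; exact n7 hP])
    simp only [h0, h1, h2, h3, h4, h5, h6, h7, h8]
    simp [hm]
    decide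
  have n8 : ¬ pvP s 8 := fun h => h8 ((pvP8 s).mp h)
  by_cases h9 : (["leg", "thigh", "knee", "shin", "foot", "calf"].any (fun kw => PySem.Str.isIn kw s)) = true
  · have hm := pvMinHits s 9 ((pvP9 s).mpr h9) (fun q hq hP => by
      obtain ⟨hql, hqr⟩ := pvP_range s q hP
      interval_cases q <;> [exact n0 hP; exact n1 hP; exact n2 hP; exact n3 hP; exact n4 hP; exact n5 hP; exact n6 hP; exact n7 hP; exact n8 hP])
    simp only [h0, h1, h2, h3, h4, h5, h6, h7, h8, h9]
    simp [hm]
    decide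
  have n9 : ¬ pvP s 9 := fun h => h9 ((pvP9 s).mp h)
  have hm := pvNoHits s (fun q hP => by
    obtain ⟨hql, hqr⟩ := pvP_range s q hP
    interval_cases q <;> [exact n0 hP; exact n1 hP; exact n2 hP; exact n3 hP; exact n4 hP; exact n5 hP; exact n6 hP; exact n7 hP; exact n8 hP; exact n9 hP])
  simp only [h0, h1, h2, h3, h4, h5, h6, h7, h8, h9]
  simp [hm]
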